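-- pv_equiv track=rewrite | github.com/zouyi777/py_nn_999 | seq2seq_直选_predict.py | preData
-- ===== SOURCE A (Python) =====
-- def appendTo3(label_sequence_str):
--     label_sequence_str = str(label_sequence_str)
--     label_sequence = []
--     if len(label_sequence_str) == 1:  # 如果只有一位数，前面补两个0
--         pre_zero2 = [0, 0]
--         pre_zero2.append(int(label_sequence_str[0]))
--         label_sequence = pre_zero2
--     elif len(label_sequence_str) == 2:  # 如果只有两位数，前面补一个0
--         pre_zero1 = [0]
--         pre_zero1.append(int(label_sequence_str[0]))
--         pre_zero1.append(int(label_sequence_str[1]))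
--         label_sequence = pre_zero1
--     else:
--         label_sequence.append(int(label_sequence_str[0]))
--         label_sequence.append(int(label_sequence_str[1]))
--         label_sequence.append(int(label_sequence_str[2]))
--     return label_sequence
--
-- def preData(src_list,piece_len):
--     pre_list = []
--     for i in range(len(src_list)-piece_len):
--         item = []
--         for j in range(piece_len):
--             item = item + appendTo3(src_list[i+j])
--         pre_list.append(item)
--     return pre_list
-- ===== SOURCE B (Python) =====
-- def appendTo3(label_sequence_str):
--     label_sequence_str = str(label_sequence_str)
--     label_sequence = []
--     if len(label_sequence_str) == 1:  # one digit: pad two zeros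
--         pre_zero2 = [0, 0]
--         pre_zero2.append(int(label_sequence_str[0]))
--         label_sequence = pre_zero2
--     elif len(label_sequence_str) == 2:  # two digits: pad one zero
--         pre_zero1 = [0]
--         pre_zero1.append(int(label_sequence_str[0]))
--         pre_zero1.append(int(label_sequence_str[1]))
--         label_sequence = pre_zero1
--     else:
--         label_sequence.append(int(label_sequence_str[0]))
--         label_sequence.append(int(label_sequence_str[1]))
--         label_sequence.append(int(label_sequence_str[2]))
--     return label_sequence
--
-- def preData(src_list, piece_len):
--     n = len(src_list)
--     if 1 <= piece_len < n:
--         # expand each used source element (all but the last) once into a flat digit table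
--         flat = [d for x in src_list[:-1] for d in appendTo3(x)]
--     else:
--         flat = []
--     # window i is a slice of the table: element k occupies positions 3k..3k+2
--     return [flat[3 * i: 3 * (i + piece_len)] for i in range(n - piece_len)]
-- ===== Notes on version B (the rewrite author's own statement) =====
-- stated objective: simpler
-- what changed: B replaces A's doubly-nested recompute-and-concat loop (each window re-expands its piece_len elements via appendTo3 and concatenates) by one pass that expands each used element once into a flat digit table, then emits every window as a single slice flat[3*i:3*(i+piece_len)] of that table.
import Mathlib
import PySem

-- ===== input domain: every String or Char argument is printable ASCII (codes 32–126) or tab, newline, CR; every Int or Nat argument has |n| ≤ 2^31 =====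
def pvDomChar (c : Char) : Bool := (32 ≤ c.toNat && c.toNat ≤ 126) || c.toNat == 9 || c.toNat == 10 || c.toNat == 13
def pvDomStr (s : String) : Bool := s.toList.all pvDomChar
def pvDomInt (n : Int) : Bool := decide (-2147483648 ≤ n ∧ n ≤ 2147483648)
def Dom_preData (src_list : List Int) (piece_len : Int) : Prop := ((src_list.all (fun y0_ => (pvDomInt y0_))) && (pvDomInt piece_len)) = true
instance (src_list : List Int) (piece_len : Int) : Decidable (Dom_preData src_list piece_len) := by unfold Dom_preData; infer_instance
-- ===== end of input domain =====

-- B expands each used source element once into a flat digit table and produces every window by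
-- slicing that table, replacing A's per-window re-expansion and concatenation loop.

-- ===== PORT A =====
-- shared helper of both Python files, transliterated; int(c) on a non-digit character raises
-- ValueError in Python (= the '.getD 0' default here), excluded by Pre_preData
def appendTo3 (x : Int) : List Int :=
  let s := PySem.Int.toChars x
  let d := fun (k : Nat) => ((s[k]?).bind (fun c => PySem.Int.ofChars? [c])).getD 0
  if s.length = 1 then [0, 0, d 0]
  else if s.length = 2 then [0, d 0, d 1]
  else [d 0, d 1, d 2]

def preData (src_list : List Int) (piece_len : Int) : List (List Int) :=
  (PySem.List.pyRange 0 (PySem.List.len src_list - piece_len) 1).foldl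
    (fun pre_list i =>
      pre_list ++
        [(PySem.List.pyRange 0 piece_len 1).foldl
          (fun item j => item ++ appendTo3 (PySem.List.pyGetD src_list (i + j) 0)) []]) []

-- ===== PORT B =====
def preData_alt (src_list : List Int) (piece_len : Int) : List (List Int) :=
  let n : Int := PySem.List.len src_list
  let flat : List Int :=
    if 1 ≤ piece_len ∧ piece_len < n
    then (PySem.List.slice src_list none (some (-1))).flatMap appendTo3
    else []
  (PySem.List.pyRange 0 (n - piece_len) 1).map
    (fun i => PySem.List.slice flat (some (3 * i)) (some (3 * (i + piece_len))))

-- ===== PRECONDITION & SPEC =====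
-- Pre_ excludes exactly the inputs where Python A raises ValueError: a negative element among the
-- used ones (indices 0..len-2, reached only when 1 ≤ piece_len < len); B raises there identically.
def Pre_preData (src_list : List Int) (piece_len : Int) : Prop :=
  piece_len < 1 ∨ (src_list.length : Int) ≤ piece_len ∨ ∀ x ∈ src_list.dropLast, 0 ≤ x
instance (src_list : List Int) (piece_len : Int) : Decidable (Pre_preData src_list piece_len) := by
  unfold Pre_preData; infer_instance
def pvWitness_preData : List Int × Int := ([1, 22, 333, 5], 2)

def Spec_preData (src_list : List Int) (piece_len : Int) (out : List (List Int)) : Prop := out = preData_alt src_list piece_len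
instance (src_list : List Int) (piece_len : Int) (out : List (List Int)) : Decidable (Spec_preData src_list piece_len out) := by unfold Spec_preData; infer_instance

-- ===== CLAIM (what is proved, stated in full; the proofs are below) =====
def Claim_equal_preData : Prop := ∀ (src_list : List Int) (piece_len : Int), Dom_preData src_list piece_len → Pre_preData src_list piece_len → Spec_preData src_list piece_len (preData src_list piece_len)

-- ===== LEMMAS AND PROOFS =====

lemma appendTo3_length_of_nonneg (x : Int) (_hx : 0 ≤ x) : (appendTo3 x).length = 3 := by
  unfold appendTo3
  dsimp only
  split_ifs <;> simp

lemma slice_nil (a : Int) (b : Option Int) : PySem.List.slice ([] : List Int) (some a) b = [] := by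
  simp [PySem.List.slice]

-- taking 3*q digits of the flat table is the concatenation of the first q expansions
lemma take_flatMap_appendTo3 (q : Nat) (L : List Int) (h : ∀ x ∈ L, 0 ≤ x) (hq : q ≤ L.length) :
    (L.flatMap appendTo3).take (3 * q)
      = (List.range q).flatMap (fun j => appendTo3 (L.getD j 0)) := by
  induction q generalizing L with
  | zero => simp
  | succ q ih =>
    cases L with
    | nil => simp at hq
    | cons y L' =>
      have hy3 : (appendTo3 y).length = 3 := appendTo3_length_of_nonneg y (h y (by simp))
      have h3 : 3 * (q + 1) = (appendTo3 y).length + 3 * q := by omega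
      rw [List.flatMap_cons, h3, List.take_length_add_append,
          List.range_succ_eq_map, List.flatMap_cons, List.flatMap_map]
      simp only [List.getD_cons_zero, List.getD_cons_succ]
      rw [ih L' (fun x hx => h x (by simp [hx])) (by simp only [List.length_cons] at hq; omega)]

-- the window starting at element a: drop 3*a digits, take 3*q
lemma window_flatMap_appendTo3 (a q : Nat) (L : List Int) (h : ∀ x ∈ L, 0 ≤ x)
    (hle : a + q ≤ L.length) :
    ((L.flatMap appendTo3).drop (3 * a)).take (3 * q)
      = (List.range q).flatMap (fun j => appendTo3 (L.getD (a + j) 0)) := by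
  induction a generalizing L with
  | zero => simpa using take_flatMap_appendTo3 q L h (by omega)
  | succ a ih =>
    cases L with
    | nil => simp at hle
    | cons y L' =>
      have hy3 : (appendTo3 y).length = 3 := appendTo3_length_of_nonneg y (h y (by simp))
      have h3 : 3 * (a + 1) = (appendTo3 y).length + 3 * a := by omega
      rw [List.flatMap_cons, h3, List.drop_length_add_append]
      have hsh : ∀ j : Nat, (y :: L').getD (a + 1 + j) 0 = L'.getD (a + j) 0 := by
        intro j
        have : a + 1 + j = (a + j) + 1 := by omega
        rw [this, List.getD_cons_succ]
      simp only [hsh]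
      exact ih L' (fun x hx => h x (by simp [hx])) (by simp only [List.length_cons] at hle; omega)

-- the per-window identity in the main (1 ≤ piece_len < len) case
lemma item_eq_slice (src_list : List Int) (piece_len : Int)
    (hp : 1 ≤ piece_len) (hn : piece_len < (src_list.length : Int))
    (hpos : ∀ x ∈ src_list.dropLast, 0 ≤ x)
    (i : Int) (hi0 : 0 ≤ i) (hi : i < (src_list.length : Int) - piece_len) :
    (PySem.List.pyRange 0 piece_len 1).foldl
        (fun item j => item ++ appendTo3 (PySem.List.pyGetD src_list (i + j) 0)) []
      = PySem.List.slice (src_list.dropLast.flatMap appendTo3)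
          (some (3 * i)) (some (3 * (i + piece_len))) := by
  obtain ⟨a, rfl⟩ : ∃ a : Nat, i = (a : Int) := ⟨i.toNat, (Int.toNat_of_nonneg hi0).symm⟩
  obtain ⟨q, rfl⟩ : ∃ q : Nat, piece_len = (q : Int) :=
    ⟨piece_len.toNat, (Int.toNat_of_nonneg (by omega)).symm⟩
  have hLlen : src_list.dropLast.length = src_list.length - 1 := List.length_dropLast
  have hlen : a + q ≤ src_list.dropLast.length := by omega
  rw [PySem.List.foldl_append_eq_flatMap, PySem.List.pyRange_one, List.flatMap_map, List.nil_append]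
  have hb : (0 : Int) ≤ 3 * ((a : Int) + (q : Int)) := by positivity
  rw [PySem.List.slice_toNat _ (by positivity) hb]
  have h1 : (3 * ((a : Int) + (q : Int))).toNat = 3 * a + 3 * q := by omega
  have h2 : (3 * (a : Int)).toNat = 3 * a := by omega
  rw [h1, h2]
  have h3 : 3 * a + 3 * q - 3 * a = 3 * q := by omega
  rw [h3, window_flatMap_appendTo3 a q _ hpos hlen]
  apply List.flatMap_congr
  intro j hj
  have hj' : j < q := List.mem_range.mp hj
  have hcast : (a : Int) + ((0 : Int) + (j : Int)) = ((a + j : Nat) : Int) := by push_cast; ring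
  rw [hcast, PySem.List.pyGetD_natCast]
  have hlt : a + j < src_list.dropLast.length := by omega
  have hlt' : a + j < src_list.length := by omega
  rw [List.getD_eq_getElem _ _ hlt', List.getD_eq_getElem _ _ hlt, List.getElem_dropLast]

lemma preData_eq_degenerate_lt_one (src_list : List Int) (piece_len : Int)
    (hp : piece_len < 1) :
    preData src_list piece_len = preData_alt src_list piece_len := by
  simp only [preData, preData_alt]
  rw [if_neg (by omega)]
  rw [PySem.List.pyRange_one_eq_nil (a := 0) (b := piece_len) (by omega)]
  simp only [List.foldl_nil]
  rw [PySem.List.foldl_append_singleton_eq_map, List.nil_append]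
  apply List.map_congr_left
  intro i _
  rw [slice_nil]

lemma preData_eq_degenerate_short (src_list : List Int) (piece_len : Int)
    (_hp : 1 ≤ piece_len) (hn : (src_list.length : Int) ≤ piece_len) :
    preData src_list piece_len = preData_alt src_list piece_len := by
  have hz : PySem.List.pyRange 0 (PySem.List.len src_list - piece_len) 1 = [] :=
    PySem.List.pyRange_one_eq_nil (by simp only [PySem.List.len_eq]; omega)
  simp only [preData, preData_alt, hz, List.foldl_nil, List.map_nil]

lemma preData_eq_main (src_list : List Int) (piece_len : Int)
    (hp : 1 ≤ piece_len) (hn : piece_len < (src_list.length : Int))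
    (hpos : ∀ x ∈ src_list.dropLast, 0 ≤ x) :
    preData src_list piece_len = preData_alt src_list piece_len := by
  simp only [preData, preData_alt, PySem.List.len_eq]
  rw [if_pos ⟨hp, hn⟩, PySem.List.slice_to_neg_one,
      PySem.List.foldl_append_singleton_eq_map, List.nil_append]
  apply List.map_congr_left
  intro i hi
  have hmem := PySem.List.mem_pyRange_one.mp hi
  exact item_eq_slice src_list piece_len hp hn hpos i hmem.1 hmem.2

-- ===== VERDICT (by name: the statement is the Claim_ definition above) =====
theorem preData_spec : Claim_equal_preData := by
  intro src_list piece_len _ hpre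
  unfold Spec_preData
  rcases lt_or_ge piece_len 1 with hp | hp
  · exact (preData_eq_degenerate_lt_one src_list piece_len hp).symm ▸ rfl
  · rcases le_or_gt (src_list.length : Int) piece_len with hn | hn
    · exact (preData_eq_degenerate_short src_list piece_len hp hn)
    · rcases hpre with h | h | h
      · omega
      · omega
      · exact preData_eq_main src_list piece_len hp hn h
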